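-- pv_equiv track=rewrite | github.com/AP-MI-2021/lab-2-BordianuRaul | main.py | is_antipalindrome
-- ===== SOURCE A (Python) =====
-- def is_antipalindrome(n):
--
--     clona_n=n
--     invers_n=0
--     nr_cifre=0
--
--     while clona_n:
--
--         invers_n=invers_n*10+clona_n%10
--         clona_n//=10
--         nr_cifre+=1
--
--     if nr_cifre % 2 == 1:
--         ok=0
--     else: ok=1
--
--     while invers_n:
--         if invers_n%10 == n%10:
--             ok=ok+1
--         if ok==2:
--             return False
--         invers_n//=10
--         n//=10
--     return True
-- ===== SOURCE B (Python) =====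
-- def is_antipalindrome(n):
--     d = []
--     clona = n
--     while clona:
--         d.append(clona % 10)
--         clona //= 10
--     L = len(d)
--     for i in range(L // 2):
--         if d[i] == d[L - 1 - i]:
--             return False
--     return True
-- ===== Notes on version B (the rewrite author's own statement) =====
-- stated objective: alternative
-- what changed: B extracts the digits into a list with the same arithmetic loop and does one half-range mirror scan (d[i]==d[L-1-i] for i < L//2), replacing A's numeric reversal plus a second digit-peeling loop with a parity-offset 'ok' counter; because A's reversal drops n's trailing zeros, A misses mirror pairs buried in the trailing-zero block and B fixes that.
-- intended difference: On n ≥ 0 whose digit string contains an equal mirror pair (so n is not an antipalindrome) while the comparisons A actually performs against the zero-stripped reversal yield at most 1 - (L even) matches, A returns True (e.g. A(1000)=True) although digits 0,0 sit at mirror positions; B returns False, the intended answer. — e.g. on is_antipalindrome(1000): A returns true, B returns false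
import Mathlib
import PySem

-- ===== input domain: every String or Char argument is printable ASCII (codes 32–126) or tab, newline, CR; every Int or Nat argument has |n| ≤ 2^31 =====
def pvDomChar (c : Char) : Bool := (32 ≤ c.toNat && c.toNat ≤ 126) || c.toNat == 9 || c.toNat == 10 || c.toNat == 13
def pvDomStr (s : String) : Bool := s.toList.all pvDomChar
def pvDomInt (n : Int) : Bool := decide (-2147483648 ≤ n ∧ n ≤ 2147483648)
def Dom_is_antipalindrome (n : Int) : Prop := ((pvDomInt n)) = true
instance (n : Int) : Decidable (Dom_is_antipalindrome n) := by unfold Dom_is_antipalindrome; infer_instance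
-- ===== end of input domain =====

-- B replaces A's number-reversal + parity-offset 'ok' counter with a digit list and a
-- single half-range mirror scan (objective: alternative decomposition); on numbers whose
-- only equal mirror digit pair sits inside the trailing-zero block that A's reversal drops,
-- A wrongly answers True while B answers False (see D_ below).

-- termination helper cited by the ports' loops (Python's `x //= 10` on a positive x shrinks it)
theorem pv_div10_toNat_lt (c : Int) (h : ¬ c ≤ 0) : (PySem.Int.floordiv c 10).toNat < c.toNat := by
  rw [PySem.Int.floordiv_eq_ediv_of_pos (by norm_num)]
  have h1 : c / 10 < c := Int.ediv_lt_of_lt_mul (by norm_num) (by omega)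
  have h2 : (0:Int) ≤ c / 10 := Int.ediv_nonneg (by omega) (by norm_num)
  omega

-- ===== PORT A =====
-- first while-loop of A (`while clona_n:`); the `c ≤ 0` guard only totalizes the cases
-- where Python loops forever (negative c), it is `c = 0` on the admitted inputs
def aRev (c inv cnt : Int) : Int × Int :=
  if h : c ≤ 0 then (inv, cnt)
  else aRev (PySem.Int.floordiv c 10) (inv * 10 + PySem.Int.mod c 10) (cnt + 1)
termination_by c.toNat
decreasing_by exact pv_div10_toNat_lt c h

-- second while-loop of A (`while invers_n:`), same totalizing guard
def aLoop2 (inv m ok : Int) : Bool :=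
  if h : inv ≤ 0 then true
  else
    let ok' := if PySem.Int.mod inv 10 = PySem.Int.mod m 10 then ok + 1 else ok
    if ok' = 2 then false
    else aLoop2 (PySem.Int.floordiv inv 10) (PySem.Int.floordiv m 10) ok'
termination_by inv.toNat
decreasing_by exact pv_div10_toNat_lt inv h

def is_antipalindrome (n : Int) : Bool :=
  let p := aRev n 0 0
  let ok : Int := if PySem.Int.mod p.2 2 = 1 then 0 else 1
  aLoop2 p.1 n ok

-- ===== PORT B =====
-- B's digit-extraction loop (`while clona:`), same totalizing guard as A's loops
def bDigits (c : Int) : List Int :=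
  if h : c ≤ 0 then []
  else PySem.Int.mod c 10 :: bDigits (PySem.Int.floordiv c 10)
termination_by c.toNat
decreasing_by exact pv_div10_toNat_lt c h

-- `for i in range(L // 2): if d[i] == d[L-1-i]: return False` then `return True`
def is_antipalindrome_alt (n : Int) : Bool :=
  let d := bDigits n
  let L := d.length
  (List.range (L / 2)).all (fun i => !(d.getD i 0 == d.getD (L - 1 - i) 0))

-- ===== PRECONDITION & SPEC =====
-- Python A's first while-loop never terminates for negative n (clona_n //= 10 sticks at -1),
-- so A only returns on n ≥ 0; B diverges there identically, and nothing is claimed.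
def Pre_is_antipalindrome (n : Int) : Prop := 0 ≤ n
instance (n : Int) : Decidable (Pre_is_antipalindrome n) := by unfold Pre_is_antipalindrome; infer_instance
def pvWitness_is_antipalindrome : Int := 21

-- On n ≥ 0 whose decimal digits d (least significant first, L of them, t of them trailing
-- zeros) contain an equal mirror pair — more mirror matches than the always-matching middle,
-- so n is NOT an antipalindrome — while the L-t comparisons A actually performs against the
-- zero-stripped reversal match at most L%2 times, A returns True (e.g. A(1000)=True) though
-- digits 0,0 sit at mirror positions; B returns False, the intended answer.
def D_is_antipalindrome (n : Int) : Prop :=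
  0 ≤ n ∧
  let d := Nat.digits 10 n.toNat
  let p := fun j => d.getD j 0 == d.getD (d.length - 1 - j) 0
  d.length % 2 < (List.range d.length).countP p ∧
  (List.range (d.length - d.findIdx (fun x => !(x == 0)))).countP p ≤ d.length % 2
instance (n : Int) : Decidable (D_is_antipalindrome n) := by unfold D_is_antipalindrome; infer_instance

def Spec_is_antipalindrome (n : Int) (out : Bool) : Prop := ¬ D_is_antipalindrome n → out = is_antipalindrome_alt n
instance (n : Int) (out : Bool) : Decidable (Spec_is_antipalindrome n out) := by unfold Spec_is_antipalindrome; infer_instance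

def pvDiffWitness_is_antipalindrome : Int := 1000
def pvDiffWitnessOut_is_antipalindrome : Bool × Bool := (true, false)

-- ===== CLAIM (what is proved, stated in full; the proofs are below) =====
def Claim_unchanged_is_antipalindrome : Prop := ∀ (n : Int), Dom_is_antipalindrome n → Pre_is_antipalindrome n → Spec_is_antipalindrome n (is_antipalindrome n)
def Claim_changed_is_antipalindrome : Prop := Dom_is_antipalindrome (pvDiffWitness_is_antipalindrome) ∧ Pre_is_antipalindrome (pvDiffWitness_is_antipalindrome) ∧ D_is_antipalindrome (pvDiffWitness_is_antipalindrome) ∧ is_antipalindrome (pvDiffWitness_is_antipalindrome) = pvDiffWitnessOut_is_antipalindrome.1 ∧ is_antipalindrome_alt (pvDiffWitness_is_antipalindrome) = pvDiffWitnessOut_is_antipalindrome.2 ∧ pvDiffWitnessOut_is_antipalindrome.1 ≠ pvDiffWitnessOut_is_antipalindrome.2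
def Claim_exact_is_antipalindrome : Prop := ∀ (n : Int), Dom_is_antipalindrome n → Pre_is_antipalindrome n → D_is_antipalindrome n → is_antipalindrome n ≠ is_antipalindrome_alt n

-- ===== LEMMAS AND PROOFS =====

-- input-shape helpers for D_ (decimal digits of n, least significant first)
def pvDs (n : Int) : List ℕ := Nat.digits 10 n.toNat
def pvL (n : Int) : ℕ := (pvDs n).length
-- number of trailing zero digits of n = index of the first nonzero digit
def pvT (n : Int) : ℕ := (pvDs n).findIdx (fun d => !(d == 0))
def pvMatch (n : Int) (j : ℕ) : Bool := (pvDs n).getD j 0 == (pvDs n).getD (pvL n - 1 - j) 0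

theorem pv_fd_toNat (c : Int) (h : 0 ≤ c) : (PySem.Int.floordiv c 10).toNat = c.toNat / 10 := by
  have hc : c = ((c.toNat : ℕ) : ℤ) := by omega
  rw [hc, show ((10:ℤ)) = ((10:ℕ):ℤ) by norm_num, PySem.Int.floordiv_natCast]
  exact Int.toNat_natCast _

theorem pv_fd_nonneg (c : Int) : 0 ≤ PySem.Int.floordiv c 10 ∨ c < 0 := by
  rcases lt_or_ge c 0 with h | h
  · exact Or.inr h
  · left
    rw [PySem.Int.floordiv_eq_ediv_of_pos (by norm_num)]
    exact Int.ediv_nonneg h (by norm_num)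

theorem pv_mod_cast (c : Int) (h : 0 ≤ c) : PySem.Int.mod c 10 = ((c.toNat % 10 : ℕ) : ℤ) := by
  have hc : c = ((c.toNat : ℕ) : ℤ) := by omega
  rw [hc, show ((10:ℤ)) = ((10:ℕ):ℤ) by norm_num, PySem.Int.mod_natCast]; simp

-- A's auxiliary match counter used only to state loop2_char
def pvMcount (inv m : Int) : ℕ :=
  if h : inv ≤ 0 then 0
  else (if PySem.Int.mod inv 10 = PySem.Int.mod m 10 then 1 else 0)
       + pvMcount (PySem.Int.floordiv inv 10) (PySem.Int.floordiv m 10)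
termination_by inv.toNat
decreasing_by exact pv_div10_toNat_lt inv h

theorem loop2_char (inv m ok : Int) (h0 : 0 ≤ ok) (h1 : ok ≤ 1) :
    aLoop2 inv m ok = decide (ok.toNat + pvMcount inv m ≤ 1) := by
  rw [aLoop2, pvMcount]
  by_cases hc : inv ≤ 0
  · have hok : ok.toNat ≤ 1 := by omega
    simp [dif_pos hc, hok]
  · simp only [dif_neg hc]
    by_cases hm : PySem.Int.mod inv 10 = PySem.Int.mod m 10
    · simp only [if_pos hm]
      by_cases hok : ok + 1 = 2
      · have h1' : ok.toNat = 1 := by omega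
        simp only [if_pos hok, h1']
        symm; rw [decide_eq_false_iff_not]; omega
      · simp only [if_neg hok]
        rw [loop2_char _ _ (ok+1) (by omega) (by omega), decide_eq_decide]
        omega
    · simp only [if_neg hm]
      rw [if_neg (show ¬ ok = 2 by omega)]
      rw [loop2_char _ _ ok h0 h1, decide_eq_decide]
      omega
termination_by inv.toNat
decreasing_by all_goals exact pv_div10_toNat_lt inv hc

theorem digit_getD (N j : ℕ) : (Nat.digits 10 N).getD j 0 = N / 10 ^ j % 10 := by
  rcases Nat.eq_zero_or_pos N with h | h
  · subst h; simp
  · rw [Nat.digits_def' (by norm_num : 1 < 10) h]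
    cases j with
    | zero => simp
    | succ j =>
      simp only [List.getD_cons_succ]
      rw [digit_getD (N / 10) j, Nat.div_div_eq_div_mul, pow_succ, Nat.mul_comm]
termination_by N
decreasing_by exact Nat.div_lt_self h (by norm_num)

theorem mcount_eq (inv m : Int) (hi : 0 ≤ inv) (hm : 0 ≤ m) :
    pvMcount inv m
      = (List.range (Nat.digits 10 inv.toNat).length).countP
          (fun j => (Nat.digits 10 inv.toNat).getD j 0 == m.toNat / 10 ^ j % 10) := by
  rw [pvMcount]
  by_cases hc : inv ≤ 0
  · have h0 : inv.toNat = 0 := by omega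
    simp [dif_pos hc, h0]
  · simp only [dif_neg hc]
    have hpos : 0 < inv.toNat := by omega
    have hfi : 0 ≤ PySem.Int.floordiv inv 10 := (pv_fd_nonneg inv).resolve_right (by omega)
    have hfm : 0 ≤ PySem.Int.floordiv m 10 := (pv_fd_nonneg m).resolve_right (by omega)
    rw [mcount_eq _ _ hfi hfm, pv_fd_toNat inv hi, pv_fd_toNat m hm]
    rw [Nat.digits_def' (by norm_num : 1 < 10) hpos]
    simp only [List.length_cons]
    rw [List.range_succ_eq_map, List.countP_cons, List.countP_map]
    have hmods : (PySem.Int.mod inv 10 = PySem.Int.mod m 10) ↔ (inv.toNat % 10 = m.toNat % 10) := by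
      rw [pv_mod_cast inv hi, pv_mod_cast m hm]
      exact Int.natCast_inj
    have e1 : ((fun j => (inv.toNat % 10 :: Nat.digits 10 (inv.toNat / 10)).getD j 0 == m.toNat / 10 ^ j % 10) ∘ Nat.succ)
        = fun j => (Nat.digits 10 (inv.toNat / 10)).getD j 0 == m.toNat / 10 / 10 ^ j % 10 := by
      funext j
      simp only [Function.comp, List.getD_cons_succ]
      rw [Nat.div_div_eq_div_mul, pow_succ, Nat.mul_comm]
    rw [e1]
    have e0 : ((inv.toNat % 10 :: Nat.digits 10 (inv.toNat / 10)).getD 0 0 == m.toNat / 10 ^ 0 % 10)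
        = decide (inv.toNat % 10 = m.toNat % 10) := by
      by_cases h : inv.toNat % 10 = m.toNat % 10 <;> simp [h]
    rw [e0]
    by_cases hh : inv.toNat % 10 = m.toNat % 10
    · simp only [hmods.mpr hh, if_pos, decide_eq_true_eq, hh]
      omega
    · have : ¬ PySem.Int.mod inv 10 = PySem.Int.mod m 10 := fun h => hh (hmods.mp h)
      simp only [this, if_false, decide_eq_true_eq, hh]
      omega

theorem aRev_eq (c inv cnt : Int) (h : 0 ≤ c) :
    aRev c inv cnt
      = (inv * 10 ^ (Nat.digits 10 c.toNat).length
           + ((Nat.ofDigits 10 (Nat.digits 10 c.toNat).reverse : ℕ) : ℤ),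
         cnt + ((Nat.digits 10 c.toNat).length : ℤ)) := by
  rw [aRev]
  by_cases hc : c ≤ 0
  · have h0 : c.toNat = 0 := by omega
    simp [dif_pos hc, h0]
  · simp only [dif_neg hc]
    have hf : 0 ≤ PySem.Int.floordiv c 10 := (pv_fd_nonneg c).resolve_right (by omega)
    rw [aRev_eq _ _ _ hf, pv_fd_toNat c h]
    have hpos : 0 < c.toNat := by omega
    rw [Nat.digits_def' (by norm_num : 1 < 10) hpos]
    simp only [List.reverse_cons, List.length_cons]
    rw [Nat.ofDigits_append]
    rw [pv_mod_cast c h]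
    simp only [Prod.mk.injEq]
    constructor
    · simp only [Nat.ofDigits_singleton, List.length_reverse]
      push_cast
      ring
    · push_cast
      ring
termination_by c.toNat
decreasing_by exact pv_div10_toNat_lt c hc

theorem rev_digits (N : ℕ) :
    Nat.digits 10 (Nat.ofDigits 10 (Nat.digits 10 N).reverse)
      = ((Nat.digits 10 N).reverse).take
          ((Nat.digits 10 N).length - (Nat.digits 10 N).findIdx (fun d => !(d == 0))) := by
  rcases Nat.eq_zero_or_pos N with h0 | hpos
  · subst h0; simp
  · set ds := Nat.digits 10 N with hds
    set L := ds.length with hL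
    set t := ds.findIdx (fun d => !(d == 0)) with ht
    have hne : ds ≠ [] := Nat.digits_ne_nil_iff_ne_zero.mpr (by omega)
    have htL : t < L := by
      rw [ht, hL]
      apply List.findIdx_lt_length.mpr
      refine ⟨ds.getLast hne, List.getLast_mem hne, ?_⟩
      simp only [Bool.not_eq_true', beq_eq_false_iff_ne, ne_eq]
      exact Nat.getLast_digit_ne_zero 10 (by omega : N ≠ 0)
    have htake : ds.take t = List.replicate t 0 := by
      apply List.eq_replicate_iff.mpr
      constructor
      · rw [List.length_take]; omega
      · intro b hb
        obtain ⟨j, hj, rfl⟩ := List.mem_take_iff_getElem.mp hb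
        have hjt : j < t := by omega
        have := List.not_of_lt_findIdx (ht ▸ hjt)
        simpa using this
    have hzeros : Nat.ofDigits 10 (List.replicate t (0:ℕ)) = 0 := by
      induction t with
      | zero => simp
      | succ t ih => simp [List.replicate_succ, Nat.ofDigits_cons, ih]
    have hdrop : ds.reverse.drop (L - t) = List.replicate t 0 := by
      rw [List.drop_reverse]
      rw [show ds.length - (L - t) = t by omega, htake, List.reverse_replicate]
    have hsplit : ds.reverse = ds.reverse.take (L - t) ++ List.replicate t 0 := by
      conv_lhs => rw [← List.take_append_drop (L - t) ds.reverse]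
      rw [hdrop]
    have hval : Nat.ofDigits 10 ds.reverse = Nat.ofDigits 10 (ds.reverse.take (L - t)) := by
      conv_lhs => rw [hsplit]
      rw [Nat.ofDigits_append, hzeros, Nat.mul_zero, Nat.add_zero]
    rw [hval]
    apply Nat.digits_ofDigits 10 (by norm_num)
    · intro x hx
      exact Nat.digits_lt_base (by norm_num) (List.mem_reverse.mp (List.mem_of_mem_take hx))
    · intro hA
      have hlen : (ds.reverse.take (L - t)).length = L - t := by
        rw [List.length_take, List.length_reverse]; omega
      rw [List.getLast_eq_getElem, List.getElem_take, List.getElem_reverse]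
      simp only [hlen]
      have hidx : ds.length - 1 - (L - t - 1) = t := by omega
      simp only [hidx]
      have hw : List.findIdx (fun d => !(d == 0)) ds < ds.length := by rw [← ht, ← hL]; omega
      have := @List.findIdx_getElem _ (fun d => !(d == 0)) ds hw
      simp only [Bool.not_eq_true', beq_eq_false_iff_ne, ne_eq] at this
      exact this

theorem bDigits_eq (n : Int) (h : 0 ≤ n) :
    bDigits n = (pvDs n).map (fun d : ℕ => (d : ℤ)) := by
  rw [bDigits]
  by_cases hc : n ≤ 0
  · have h0 : n.toNat = 0 := by omega
    simp [dif_pos hc, pvDs, h0]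
  · simp only [dif_neg hc]
    have hf : 0 ≤ PySem.Int.floordiv n 10 := (pv_fd_nonneg n).resolve_right (by omega)
    have hpos : 0 < n.toNat := by omega
    rw [bDigits_eq _ hf]
    unfold pvDs
    rw [pv_fd_toNat n h, pv_mod_cast n h, Nat.digits_def' (by norm_num : 1 < 10) hpos]
    simp
termination_by n.toNat
decreasing_by exact pv_div10_toNat_lt n hc

theorem charA (n : Int) (h : 0 ≤ n) :
    is_antipalindrome n
      = decide ((List.range (pvL n - pvT n)).countP (pvMatch n)
                  + (if pvL n % 2 = 0 then 1 else 0) ≤ 1) := by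
  have hM : pvMatch n = fun j => (Nat.digits 10 n.toNat).getD j 0
      == (Nat.digits 10 n.toNat).getD ((Nat.digits 10 n.toNat).length - 1 - j) 0 := rfl
  simp only [pvL, pvT, pvDs, hM]
  simp only [is_antipalindrome]
  rw [aRev_eq n 0 0 h]
  simp only [zero_mul, zero_add]
  have hok : (if PySem.Int.mod ((Nat.digits 10 n.toNat).length : ℤ) 2 = 1 then (0:ℤ) else 1)
      = if (Nat.digits 10 n.toNat).length % 2 = 0 then 1 else 0 := by
    rw [show ((2:ℤ)) = ((2:ℕ):ℤ) by norm_num, PySem.Int.mod_natCast]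
    rcases Nat.mod_two_eq_zero_or_one (Nat.digits 10 n.toNat).length with h2 | h2 <;> simp [h2]
  rw [hok]
  rw [loop2_char _ _ _ (by split <;> norm_num) (by split <;> norm_num)]
  rw [decide_eq_decide]
  rw [mcount_eq _ n (by positivity) h]
  simp only [Int.toNat_natCast]
  rw [rev_digits n.toNat]
  have hlen : ((Nat.digits 10 n.toNat).reverse.take
      ((Nat.digits 10 n.toNat).length - (Nat.digits 10 n.toNat).findIdx fun d => !(d == 0))).length
      = (Nat.digits 10 n.toNat).length - (Nat.digits 10 n.toNat).findIdx (fun d => !(d == 0)) := by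
    rw [List.length_take, List.length_reverse]; omega
  rw [hlen]
  have hcnt : List.countP
      (fun j => ((Nat.digits 10 n.toNat).reverse.take
          ((Nat.digits 10 n.toNat).length - (Nat.digits 10 n.toNat).findIdx fun d => !(d == 0))).getD j 0
        == n.toNat / 10 ^ j % 10)
      (List.range ((Nat.digits 10 n.toNat).length - (Nat.digits 10 n.toNat).findIdx fun d => !(d == 0)))
      = List.countP
      (fun j => (Nat.digits 10 n.toNat).getD j 0
        == (Nat.digits 10 n.toNat).getD ((Nat.digits 10 n.toNat).length - 1 - j) 0)
      (List.range ((Nat.digits 10 n.toNat).length - (Nat.digits 10 n.toNat).findIdx fun d => !(d == 0))) := by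
    apply List.countP_congr
    intro j hj
    rw [List.mem_range] at hj
    have hjlt : j < ((Nat.digits 10 n.toNat).reverse.take
        ((Nat.digits 10 n.toNat).length - (Nat.digits 10 n.toNat).findIdx fun d => !(d == 0))).length := by
      rw [hlen]; omega
    have hjL : j < (Nat.digits 10 n.toNat).length := by omega
    rw [List.getD_eq_getElem _ _ hjlt, List.getElem_take, List.getElem_reverse]
    rw [← digit_getD n.toNat j]
    have hiL : (Nat.digits 10 n.toNat).length - 1 - j < (Nat.digits 10 n.toNat).length := by omega
    rw [show ((Nat.digits 10 n.toNat).getD ((Nat.digits 10 n.toNat).length - 1 - j) 0)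
        = (Nat.digits 10 n.toNat)[(Nat.digits 10 n.toNat).length - 1 - j]
        from List.getD_eq_getElem _ _ hiL]
    by_cases hx : (Nat.digits 10 n.toNat)[(Nat.digits 10 n.toNat).length - 1 - j]
        = (Nat.digits 10 n.toNat).getD j 0
    · simp [hx]
    · simp
      exact eq_comm
  rw [hcnt]
  rcases Nat.mod_two_eq_zero_or_one (Nat.digits 10 n.toNat).length with h2 | h2 <;>
    simp only [h2] <;> simp

theorem charB (n : Int) (h : 0 ≤ n) :
    is_antipalindrome_alt n = decide (∀ i, i < pvL n / 2 → ¬ pvMatch n i = true) := by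
  have hM : pvMatch n = fun j => (Nat.digits 10 n.toNat).getD j 0
      == (Nat.digits 10 n.toNat).getD ((Nat.digits 10 n.toNat).length - 1 - j) 0 := rfl
  simp only [pvL, pvDs, hM]
  simp only [is_antipalindrome_alt]
  rw [bDigits_eq n h]
  simp only [pvDs, List.length_map]
  have hcast : ∀ a b : ℕ, (((a:ℕ):ℤ) == ((b:ℕ):ℤ)) = (a == b) := by
    intro a b; by_cases hab : a = b <;> simp [hab]
  have hgd : ∀ i, ((Nat.digits 10 n.toNat).map (fun d : ℕ => (d : ℤ))).getD i 0
      = (((Nat.digits 10 n.toNat).getD i 0 : ℕ) : ℤ) := by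
    intro i
    rcases h' : (Nat.digits 10 n.toNat)[i]? with _ | v <;>
      · rw [List.getD_eq_getElem?_getD, List.getD_eq_getElem?_getD, List.getElem?_map, h']
        rfl
  by_cases hP : ∀ i, i < (Nat.digits 10 n.toNat).length / 2 →
      ¬ ((Nat.digits 10 n.toNat).getD i 0
          == (Nat.digits 10 n.toNat).getD ((Nat.digits 10 n.toNat).length - 1 - i) 0) = true
  · rw [decide_eq_true hP]
    apply List.all_eq_true.mpr
    intro i hi
    rw [List.mem_range] at hi
    have hthis := hP i hi
    rw [hgd i, hgd _, hcast]
    simpa using hthis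
  · rw [decide_eq_false hP]
    push_neg at hP
    obtain ⟨i, hi, hmi⟩ := hP
    apply List.all_eq_false.mpr
    refine ⟨i, List.mem_range.mpr hi, ?_⟩
    rw [hgd i, hgd _, hcast]
    simp only [beq_iff_eq] at hmi
    simp only [List.getD_eq_getElem?_getD] at hmi
    simp [hmi]

theorem pv_match_symm (n : Int) (j : ℕ) (hj : j < pvL n) (h : pvMatch n j = true) :
    pvMatch n (pvL n - 1 - j) = true := by
  simp only [pvMatch] at h ⊢
  have hidx : pvL n - 1 - (pvL n - 1 - j) = j := by omega
  rw [hidx]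
  simp only [beq_iff_eq] at h ⊢
  exact h.symm

theorem pv_two_le_length {l : List ℕ} {a b : ℕ} (ha : a ∈ l) (hb : b ∈ l) (hab : a ≠ b) :
    2 ≤ l.length := by
  rcases l with _ | ⟨x, xs⟩
  · simp at ha
  · rcases List.mem_cons.mp ha with rfl | ha'
    · rcases List.mem_cons.mp hb with rfl | hb'
      · exact absurd rfl hab
      · have := List.length_pos_of_mem hb'
        simp; omega
    · have := List.length_pos_of_mem ha'
      simp; omega

theorem pv_pair_of_count (n : Int) (k : ℕ) (hk : k ≤ pvL n)
    (h : pvL n % 2 < (List.range k).countP (pvMatch n)) :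
    ∃ i, i < pvL n / 2 ∧ pvMatch n i = true := by
  by_cases h2 : pvL n % 2 = 0
  · have hc : 0 < (List.range k).countP (pvMatch n) := by omega
    obtain ⟨j, hjmem, hj⟩ := List.countP_pos_iff.mp hc
    rw [List.mem_range] at hjmem
    refine ⟨min j (pvL n - 1 - j), by omega, ?_⟩
    rcases le_total j (pvL n - 1 - j) with hle | hge
    · rwa [min_eq_left hle]
    · rw [min_eq_right hge]
      exact pv_match_symm n j (by omega) hj
  · have hc : 2 ≤ (List.range k).countP (pvMatch n) := by omega
    have hex : ∃ j, j ∈ List.range k ∧ pvMatch n j = true ∧ j ≠ pvL n - 1 - j := by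
      by_contra hno
      push_neg at hno
      have hb : (List.range k).countP (pvMatch n)
          ≤ (List.range k).countP (· == (pvL n - 1) / 2) := by
        apply List.countP_mono_left
        intro a ha hpa
        have haeq := hno a ha hpa
        rw [List.mem_range] at ha
        have : a = (pvL n - 1) / 2 := by omega
        simp [this]
      have hone : (List.range k).countP (· == (pvL n - 1) / 2) ≤ 1 := by
        rw [← List.count_eq_countP, List.count_range]
        split <;> omega
      omega
    obtain ⟨j, hjr, hj, hne⟩ := hex
    rw [List.mem_range] at hjr
    refine ⟨min j (pvL n - 1 - j), by omega, ?_⟩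
    rcases le_total j (pvL n - 1 - j) with hle | hge
    · rwa [min_eq_left hle]
    · rw [min_eq_right hge]
      exact pv_match_symm n j (by omega) hj

theorem pv_count_of_pair (n : Int) (i : ℕ) (hi : i < pvL n / 2) (hmi : pvMatch n i = true) :
    pvL n % 2 < (List.range (pvL n)).countP (pvMatch n) := by
  have hiL : i < pvL n := by omega
  by_cases h2 : pvL n % 2 = 0
  · have : 0 < (List.range (pvL n)).countP (pvMatch n) :=
      List.countP_pos_iff.mpr ⟨i, List.mem_range.mpr hiL, hmi⟩
    omega
  · have hj : pvMatch n (pvL n - 1 - i) = true := pv_match_symm n i hiL hmi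
    have hne : i ≠ pvL n - 1 - i := by omega
    have hmemi : i ∈ (List.range (pvL n)).filter (pvMatch n) :=
      List.mem_filter.mpr ⟨List.mem_range.mpr hiL, hmi⟩
    have hmemj : pvL n - 1 - i ∈ (List.range (pvL n)).filter (pvMatch n) :=
      List.mem_filter.mpr ⟨List.mem_range.mpr (by omega), hj⟩
    have h2le : 2 ≤ ((List.range (pvL n)).filter (pvMatch n)).length :=
      pv_two_le_length hmemi hmemj hne
    rw [List.countP_eq_length_filter]
    omega

-- ===== VERDICT =====
theorem is_antipalindrome_spec : Claim_unchanged_is_antipalindrome := by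
  intro n hdom hpre hnd
  rw [charA n hpre, charB n hpre]
  by_cases hA : (List.range (pvL n - pvT n)).countP (pvMatch n)
      + (if pvL n % 2 = 0 then 1 else 0) ≤ 1
  · rw [decide_eq_true hA]
    have hcut : (List.range (pvL n - pvT n)).countP (pvMatch n) ≤ pvL n % 2 := by
      rcases Nat.mod_two_eq_zero_or_one (pvL n) with h2 | h2
      · rw [if_pos h2] at hA; omega
      · rw [if_neg (by omega)] at hA; omega
    have hB : ∀ i, i < pvL n / 2 → ¬ pvMatch n i = true := by
      intro i hi hmi
      exact hnd ⟨hpre, pv_count_of_pair n i hi hmi, hcut⟩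
    rw [decide_eq_true hB]
  · rw [decide_eq_false hA]
    have hgt : pvL n % 2 < (List.range (pvL n - pvT n)).countP (pvMatch n) := by
      rcases Nat.mod_two_eq_zero_or_one (pvL n) with h2 | h2
      · rw [if_pos h2] at hA; omega
      · rw [if_neg (by omega)] at hA; omega
    obtain ⟨i, hi, hmi⟩ := pv_pair_of_count n (pvL n - pvT n) (by omega) hgt
    have hB : ¬ ∀ i, i < pvL n / 2 → ¬ pvMatch n i = true := by
      intro hall; exact hall i hi hmi
    rw [decide_eq_false hB]

theorem is_antipalindrome_changed : Claim_changed_is_antipalindrome := by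
  unfold Claim_changed_is_antipalindrome
  refine ⟨by decide, by decide, by decide, ?_, ?_, by decide⟩
  · show is_antipalindrome 1000 = true
    rw [charA 1000 (by norm_num)]
    decide
  · show is_antipalindrome_alt 1000 = false
    rw [charB 1000 (by norm_num)]
    decide

theorem is_antipalindrome_tight : Claim_exact_is_antipalindrome := by
  intro n hdom hpre hd
  obtain ⟨-, hall, hcut⟩ := hd
  have hall' : pvL n % 2 < (List.range (pvL n)).countP (pvMatch n) := hall
  have hcut' : (List.range (pvL n - pvT n)).countP (pvMatch n) ≤ pvL n % 2 := hcut
  rw [charA n hpre, charB n hpre]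
  have hA : (List.range (pvL n - pvT n)).countP (pvMatch n)
      + (if pvL n % 2 = 0 then 1 else 0) ≤ 1 := by
    rcases Nat.mod_two_eq_zero_or_one (pvL n) with h2 | h2
    · rw [if_pos h2]; omega
    · rw [if_neg (by omega)]; omega
  rw [decide_eq_true hA]
  obtain ⟨i, hi, hmi⟩ := pv_pair_of_count n (pvL n) le_rfl hall' 
  have hB : ¬ ∀ i, i < pvL n / 2 → ¬ pvMatch n i = true := by
    intro hall'; exact hall' i hi hmi
  rw [decide_eq_false hB]
  simp
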